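-- pv_equiv track=rewrite | github.com/AndreaLK3/LAQP_code_final | Create_PQs/PreprocessDescriptions.py | joinSeparatedHyphens
-- ===== SOURCE A (Python) =====
-- def joinSeparatedHyphens(wordlist):
--     times = len([i for i, x in enumerate(wordlist) if x == "-"])
--     for time in range(times):
--         try:
--             hyphen_ind = wordlist.index("-")
--         except ValueError:
--             break #do nothing. No hyphens here
--         if hyphen_ind != 0 and hyphen_ind < len(wordlist) - 1: #hyphen at the borders -> wrong, and replicates wordlist
--             try:
--                 before = wordlist[hyphen_ind-1]
--                 after = wordlist[hyphen_ind + 1]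
--                 wordlist_before = wordlist[0:hyphen_ind-1]
--                 wordlist_after = wordlist[hyphen_ind+2:]
--                 composite_word = before + "-" + after
--                 wordlist = wordlist_before + [composite_word] + wordlist_after
--             except IndexError:
--                 pass#list index out of range == hyphen at the start or end of sentence. Do nothing
--     return wordlist
-- ===== SOURCE B (Python) =====
-- def joinSeparatedHyphens(wordlist):
--     # Single left-to-right pass: a bare "-" glues the previous kept word to the
--     # next input word; a hyphen with no word on one of its sides is kept as-is.
--     out = []
--     i = 0
--     while i < len(wordlist):
--         word = wordlist[i]
--         if word == "-" and out and i + 1 < len(wordlist):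
--             out[-1] = out[-1] + "-" + wordlist[i + 1]
--             i += 2
--         else:
--             out.append(word)
--             i += 1
--     return out
-- ===== Notes on version B (the rewrite author's own statement) =====
-- stated objective: alternative
-- what changed: Replaced A's repeated find-first-hyphen-and-rebuild-the-whole-list loop (list.index plus full-list slicing per hyphen) with a single left-to-right pass that glues each bare '-' onto the previously kept word; Pre_ excludes lists containing the contiguous run '', '-', '', on which merging the two empty neighbours synthesises a new bare '-' token whose further treatment depends on A's leftover hyphen budget and neither behaviour is specifiable.
-- intended difference: On lists whose first element is '-' and which contain another '-' before the last position, A returns the list unchanged (its first-hyphen scan sticks forever on the border hyphen), while B keeps the border hyphen and still merges the later interior hyphens, which is the intended behaviour. — e.g. on joinSeparatedHyphens(["-", "a", "-", "b"]): A returns ["-", "a", "-", "b"], B returns ["-", "a-b"]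
-- outside the precondition, e.g. on joinSeparatedHyphens(['x', '', '-', '', 'y', '-', 'z']): A returns ['x-y', '-', 'z'], B returns ['x', '-', 'y-z']
import Mathlib
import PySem

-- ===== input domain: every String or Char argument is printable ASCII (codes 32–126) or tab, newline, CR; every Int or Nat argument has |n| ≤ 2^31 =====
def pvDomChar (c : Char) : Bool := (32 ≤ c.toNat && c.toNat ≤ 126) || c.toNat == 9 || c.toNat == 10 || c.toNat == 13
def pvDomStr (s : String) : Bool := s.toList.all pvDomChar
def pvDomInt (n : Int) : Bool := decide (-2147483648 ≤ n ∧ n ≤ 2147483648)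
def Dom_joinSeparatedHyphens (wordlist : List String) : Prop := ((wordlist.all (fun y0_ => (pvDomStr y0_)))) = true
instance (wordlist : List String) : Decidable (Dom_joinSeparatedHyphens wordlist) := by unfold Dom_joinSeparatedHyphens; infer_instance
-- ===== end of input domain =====

-- B replaces A's repeated find-first-hyphen-and-rebuild loop with one left-to-right merging pass (objective: alternative).

-- ===== PORT A =====
-- helper: the body of A's `for time in range(times)` loop, fuel = times
def jshLoopA : Nat → List String → List String
  | 0, ws => ws
  | Nat.succ t, ws =>
    match PySem.List.index? ws "-" with
    | none => ws          -- `except ValueError: break`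
    | some h =>
      let ws' :=
        if h ≠ 0 ∧ (h : Int) < (ws.length : Int) - 1 then
          match PySem.List.pyGet? ws ((h : Int) - 1), PySem.List.pyGet? ws ((h : Int) + 1) with
          | some before, some after =>
              PySem.List.slice ws (some 0) (some ((h : Int) - 1))
                ++ [before ++ "-" ++ after]
                ++ PySem.List.slice ws (some ((h : Int) + 2)) none
          | _, _ => ws    -- `except IndexError: pass`
        else ws
      jshLoopA t ws'

def joinSeparatedHyphens (wordlist : List String) : List String :=
  jshLoopA ((PySem.List.enumerate wordlist 0).filter (fun p => p.2 == "-")).length wordlist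

-- ===== PORT B =====
-- Source B's single `while i < len(wordlist)` pass; `out` is the stack of kept words (head = most recent)
def jshB : List String → List String → List String
  | out, [] => out.reverse
  | [], w :: rest => jshB [w] rest          -- stack empty: keep the word
  | o :: os, w :: rest =>
    if w = "-" then
      match rest with
      | r :: rs => jshB ((o ++ "-" ++ r) :: os) rs   -- glue previous word to the next
      | [] => jshB (w :: o :: os) []                 -- no next word: keep the hyphen
    else jshB (w :: o :: os) rest

def joinSeparatedHyphens_alt (wordlist : List String) : List String :=
  jshB [] wordlist

-- ===== PRECONDITION & SPEC =====
-- Pre_ excludes lists containing the contiguous run "", "-", "": there the merge of the two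
-- empty neighbours synthesises a new bare "-" token, whose further treatment depends on A's
-- leftover per-hyphen budget — a corner neither behaviour of which anyone would specify.
def Pre_joinSeparatedHyphens (wordlist : List String) : Prop := ¬ ["", "-", ""] <:+: wordlist
instance (wordlist : List String) : Decidable (Pre_joinSeparatedHyphens wordlist) := by unfold Pre_joinSeparatedHyphens; infer_instance
def pvWitness_joinSeparatedHyphens : List String := ["well", "-", "known", "dog"]

-- On lists starting with "-" that contain another "-" before the last position, A returns the
-- input unchanged (its first-hyphen scan sticks forever on the border hyphen), while B keeps
-- the border hyphen and still merges the later interior hyphens — the intended behaviour.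
def D_joinSeparatedHyphens (wordlist : List String) : Prop :=
  wordlist.head? = some "-" ∧ "-" ∈ wordlist.tail.dropLast
instance (wordlist : List String) : Decidable (D_joinSeparatedHyphens wordlist) := by unfold D_joinSeparatedHyphens; infer_instance

def Spec_joinSeparatedHyphens (wordlist : List String) (out : List String) : Prop := ¬ D_joinSeparatedHyphens wordlist → out = joinSeparatedHyphens_alt wordlist
instance (wordlist : List String) (out : List String) : Decidable (Spec_joinSeparatedHyphens wordlist out) := by unfold Spec_joinSeparatedHyphens; infer_instance

def pvDiffWitness_joinSeparatedHyphens : List String := ["-", "a", "-", "b"]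
def pvDiffWitnessOut_joinSeparatedHyphens : (List String) × (List String) := (["-", "a", "-", "b"], ["-", "a-b"])

-- ===== CLAIM (what is proved, stated in full; the proofs are below) =====
def Claim_unchanged_joinSeparatedHyphens : Prop := ∀ (wordlist : List String), Dom_joinSeparatedHyphens wordlist → Pre_joinSeparatedHyphens wordlist → Spec_joinSeparatedHyphens wordlist (joinSeparatedHyphens wordlist)
def Claim_changed_joinSeparatedHyphens : Prop := Dom_joinSeparatedHyphens (pvDiffWitness_joinSeparatedHyphens) ∧ Pre_joinSeparatedHyphens (pvDiffWitness_joinSeparatedHyphens) ∧ D_joinSeparatedHyphens (pvDiffWitness_joinSeparatedHyphens) ∧ joinSeparatedHyphens (pvDiffWitness_joinSeparatedHyphens) = pvDiffWitnessOut_joinSeparatedHyphens.1 ∧ joinSeparatedHyphens_alt (pvDiffWitness_joinSeparatedHyphens) = pvDiffWitnessOut_joinSeparatedHyphens.2 ∧ pvDiffWitnessOut_joinSeparatedHyphens.1 ≠ pvDiffWitnessOut_joinSeparatedHyphens.2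
def Claim_exact_joinSeparatedHyphens : Prop := ∀ (wordlist : List String), Dom_joinSeparatedHyphens wordlist → Pre_joinSeparatedHyphens wordlist → D_joinSeparatedHyphens wordlist → joinSeparatedHyphens wordlist ≠ joinSeparatedHyphens_alt wordlist

-- ===== LEMMAS AND PROOFS =====

-- A's `times` (count of "-" via enumerate/filter) is the number of "-" elements
theorem jsh_times_eq (ws : List String) (s : Int) :
    ((PySem.List.enumerate ws s).filter (fun p => p.2 == "-")).length = ws.count "-" := by
  induction ws generalizing s with
  | nil => simp [PySem.List.enumerate_nil]
  | cons x xs ih =>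
    rw [PySem.List.enumerate_cons, List.filter_cons]
    by_cases hx : x = "-"
    · simp [hx, ih]
    · simp [hx, ih]

theorem jshLoopA_no_hyphen (b : Nat) (ws : List String) (h : "-" ∉ ws) :
    jshLoopA b ws = ws := by
  cases b with
  | zero => rfl
  | succ t => rw [jshLoopA, (PySem.List.index?_eq_none_iff ws "-").mpr h]

theorem jsh_index_front (o r : List String) (h : "-" ∉ o) :
    PySem.List.index? (o.reverse ++ "-" :: r) "-" = some o.length := by
  rw [PySem.List.index?_eq_some_iff]
  exact ⟨o.reverse, r, rfl, by simp, by simpa using h⟩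

-- A no-ops forever once the first hyphen is at index 0
theorem jshLoopA_front (b : Nat) (r : List String) :
    jshLoopA b ("-" :: r) = "-" :: r := by
  induction b with
  | zero => rfl
  | succ t ih =>
    rw [jshLoopA, PySem.List.index?_cons_self]
    simpa using ih

-- A no-ops forever once the first hyphen is the last element
theorem jshLoopA_end (b : Nat) (o : List String) (h : "-" ∉ o) :
    jshLoopA b (o.reverse ++ ["-"]) = o.reverse ++ ["-"] := by
  induction b with
  | zero => rfl
  | succ t ih =>
    rw [jshLoopA, jsh_index_front o [] h]
    have hc : ¬ ((o.length ≠ 0) ∧ ((o.length : Int) < (((o.reverse ++ ["-"]).length : Nat) : Int) - 1)) := by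
      simp
    simp only [hc, if_false]
    exact ih

-- one iteration of A's loop performs exactly one interior merge
theorem jshLoopA_step (b : Nat) (oh : String) (ot : List String) (r1 : String) (rs : List String)
    (hf : "-" ∉ oh :: ot) :
    jshLoopA (b + 1) ((oh :: ot).reverse ++ "-" :: r1 :: rs)
      = jshLoopA b (ot.reverse ++ (oh ++ "-" ++ r1) :: rs) := by
  rw [jshLoopA, jsh_index_front _ _ hf]
  have hcond : ((oh :: ot).length ≠ 0) ∧
      (((oh :: ot).length : Int) < (((oh :: ot).reverse ++ "-" :: r1 :: rs).length : Int) - 1) := by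
    refine ⟨by simp, by simp; omega⟩
  simp only [hcond]
  have hsplit : (oh :: ot).reverse ++ "-" :: r1 :: rs = ot.reverse ++ oh :: ("-" :: r1 :: rs) := by
    simp
  have h1 : PySem.List.pyGet? ((oh :: ot).reverse ++ "-" :: r1 :: rs) (((oh :: ot).length : Int) - 1)
      = some oh := by
    rw [hsplit]
    have h := PySem.List.pyGet?_append_length ot.reverse ("-" :: r1 :: rs) oh
    simpa using h
  have h2 : PySem.List.pyGet? ((oh :: ot).reverse ++ "-" :: r1 :: rs) (((oh :: ot).length : Int) + 1)
      = some r1 := by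
    have e : (oh :: ot).reverse ++ "-" :: r1 :: rs = (ot.reverse ++ [oh, "-"]) ++ r1 :: rs := by simp
    have e2 : ((oh :: ot).length : Int) + 1 = (((ot.reverse ++ [oh, "-"]).length : Nat) : Int) := by
      simp; ring
    rw [e, e2, PySem.List.pyGet?_append_length]
  rw [h1, h2]
  have h3 : PySem.List.slice ((oh :: ot).reverse ++ "-" :: r1 :: rs) (some 0) (some (((oh :: ot).length : Int) - 1))
      = ot.reverse := by
    have e : ((oh :: ot).length : Int) - 1 = ((ot.length : Nat) : Int) := by simp
    rw [e, PySem.List.slice_zero_start, PySem.List.slice_to_natCast, hsplit]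
    rw [show (ot.length = ot.reverse.length) from by simp, List.take_left]
  have h4 : PySem.List.slice ((oh :: ot).reverse ++ "-" :: r1 :: rs) (some (((oh :: ot).length : Int) + 2)) none
      = rs := by
    have e : ((oh :: ot).length : Int) + 2 = (((ot.reverse ++ [oh, "-", r1]).length : Nat) : Int) := by
      simp; ring
    rw [e, PySem.List.slice_from_natCast,
      show (oh :: ot).reverse ++ "-" :: r1 :: rs = (ot.reverse ++ [oh, "-", r1]) ++ rs from by simp,
      List.drop_left]
  rw [h3, h4]
  simp

-- main invariant: B's pass, started on a nonempty hyphen-free stack, equals A's loop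
-- on the current list (stack.reverse ++ remaining input), for any sufficient fuel
theorem jshB_eq (out rest : List String) :
    ∀ (b : Nat), out ≠ [] → "-" ∉ out →
      (∀ x, out.head? = some x → ¬ ["", "-", ""] <:+: x :: rest) → rest.count "-" ≤ b →
      jshB out rest = jshLoopA b (out.reverse ++ rest) := by
  fun_induction jshB with
  | case1 out =>
    intro b _ hfo _ _
    rw [List.append_nil]
    exact (jshLoopA_no_hyphen b out.reverse (by simpa using hfo)).symm
  | case2 w rest ih =>
    intro b hne _ _ _
    exact absurd rfl hne
  | case3 o os r rs ih =>
    intro b _ hfo hq hb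
    have hcnt : (r :: rs).count "-" + 1 ≤ b := by
      have : ("-" :: r :: rs).count "-" = (r :: rs).count "-" + 1 := by simp
      omega
    obtain ⟨b', rfl⟩ : ∃ b', b = b' + 1 := ⟨b - 1, by omega⟩
    rw [jshLoopA_step b' o os r rs hfo]
    have hq0 := hq o rfl
    have hcomp : o ++ "-" ++ r ≠ "-" := by
      intro h
      have hl := congrArg String.length h
      simp [String.length_append] at hl
      have ho : o = "" := by rw [← String.length_eq_zero_iff]; omega
      have hr : r = "" := by rw [← String.length_eq_zero_iff]; omega
      exact hq0 ⟨[], rs, by simp [ho, hr]⟩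
    have hc0 : o ++ "-" ++ r ≠ "" := by
      intro h
      have := congrArg String.length h
      simp [String.length_append] at this
    have hstep := ih b' (by simp)
      (by
        intro hx
        rcases List.mem_cons.mp hx with hx | hx
        · exact hcomp hx.symm
        · exact hfo (List.mem_cons_of_mem _ hx))
      (by
        intro x hx htri
        cases Option.some_inj.mp hx
        rcases List.infix_cons_iff.mp htri with hp | hi
        · exact hc0 (List.cons_prefix_cons.mp hp).1.symm
        · exact hq0 (hi.trans (List.IsSuffix.isInfix ⟨[o, "-", r], rfl⟩)))
      (by
        have : (r :: rs).count "-" = rs.count "-" + (if r = "-" then 1 else 0) := by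
          simp [List.count_cons]
        omega)
    rw [hstep]
    simp
  | case4 o os ih =>
    intro b _ hfo _ _
    have he := jshLoopA_end b (o :: os) hfo
    show jshB ("-" :: o :: os) [] = _
    simp [jshB]
    simpa using he.symm
  | case5 o os w rest hw ih =>
    intro b _ hfo hq hb
    have hstep := ih b (by simp)
      (by
        intro hx
        rcases List.mem_cons.mp hx with hx | hx
        · exact hw hx.symm
        · exact hfo hx)
      (by
        intro x hx htri
        cases Option.some_inj.mp hx
        exact hq o rfl (htri.trans (List.suffix_cons o (w :: rest)).isInfix))
      (by
        have : (w :: rest).count "-" = rest.count "-" := by simp [hw]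
        omega)
    rw [hstep]
    simp

-- B appends everything unchanged when no interior hyphen remains in the input
theorem jshB_no_interior (rest : List String) (out : List String)
    (h : "-" ∉ rest.dropLast) : jshB out rest = out.reverse ++ rest := by
  induction rest generalizing out with
  | nil => simp [jshB]
  | cons w rs ih =>
    cases out with
    | nil =>
      have h' : "-" ∉ rs.dropLast := by
        intro hx
        cases rs with
        | nil => simp at hx
        | cons r rs' => exact h (by simp [List.dropLast_cons_of_ne_nil]; right; simpa using hx)
      rw [show jshB [] (w :: rs) = jshB [w] rs from by simp [jshB], ih [w] h']
      simp
    | cons o os =>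
      cases rs with
      | nil =>
        by_cases hw : w = "-" <;> simp [jshB, hw]
      | cons r rs' =>
        have hw : w ≠ "-" := by
          intro hw; exact h (by simp [List.dropLast_cons_of_ne_nil, hw])
        have hw' : ¬ (w = "-") = True := by simp [hw]
        have h' : "-" ∉ (r :: rs').dropLast := by
          intro hx; exact h (by simp [List.dropLast_cons_of_ne_nil]; right; simpa using hx)
        rw [show jshB (o :: os) (w :: r :: rs') = jshB (w :: o :: os) (r :: rs') from by
            rw [jshB, if_neg hw],
          ih _ h']
        simp

-- B's output never gets longer than its input …
theorem jshB_len_le (out rest : List String) :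
    (jshB out rest).length ≤ out.length + rest.length := by
  fun_induction jshB with
  | case1 out => simp
  | case2 w rest ih => simp at ih ⊢; omega
  | case3 o os r rs ih => simp at ih ⊢; omega
  | case4 o os ih => simp at ih ⊢; omega
  | case5 o os w rest hw ih => simp at ih ⊢; omega

-- … and gets strictly shorter as soon as an interior hyphen is merged
theorem jshB_len_lt (out rest : List String) :
    out ≠ [] → "-" ∈ rest.dropLast → (jshB out rest).length < out.length + rest.length := by
  fun_induction jshB with
  | case1 out => intro _ h; simp at h
  | case2 w rest ih => intro hne _; exact absurd rfl hne
  | case3 o os r rs ih =>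
    intro _ h
    have := jshB_len_le ((o ++ "-" ++ r) :: os) rs
    simp at this ⊢; omega
  | case4 o os ih => intro _ h; simp at h
  | case5 o os w rest hw ih =>
    intro _ h
    have h' : "-" ∈ rest.dropLast := by
      cases rest with
      | nil => simp at h
      | cons r rs' =>
        rcases (by simpa [List.dropLast_cons_of_ne_nil] using h :
            "-" = w ∨ "-" ∈ (r :: rs').dropLast) with hx | hx
        · exact absurd hx.symm hw
        · exact hx
    have := ih (by simp) h'
    simp at this ⊢; omega

-- ===== VERDICT (by name: the statement is the Claim_ definition above) =====
theorem joinSeparatedHyphens_spec : Claim_unchanged_joinSeparatedHyphens := by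
  intro wl _ hpre hnd
  unfold Pre_joinSeparatedHyphens at hpre
  unfold D_joinSeparatedHyphens at hnd
  unfold joinSeparatedHyphens joinSeparatedHyphens_alt
  rw [jsh_times_eq]
  cases wl with
  | nil => simp [jshLoopA, jshB]
  | cons w rest =>
    by_cases hw : w = "-"
    · subst hw
      have hint : "-" ∉ rest.dropLast := by
        intro hx; exact hnd ⟨rfl, by simpa using hx⟩
      rw [jshLoopA_front,
        show jshB [] ("-" :: rest) = jshB ["-"] rest from by simp [jshB],
        jshB_no_interior rest ["-"] hint]
      simp
    · rw [show jshB [] (w :: rest) = jshB [w] rest from by simp [jshB]]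
      have := jshB_eq [w] rest ((w :: rest).count "-")
        (by simp) (by simpa using Ne.symm hw)
        (by intro x hx; cases Option.some_inj.mp hx; exact hpre)
        (by simp [hw])
      rw [this]
      simp

theorem joinSeparatedHyphens_changed : Claim_changed_joinSeparatedHyphens := by
  unfold Claim_changed_joinSeparatedHyphens; decide

theorem joinSeparatedHyphens_tight : Claim_exact_joinSeparatedHyphens := by
  intro wl _ _ hd
  rcases hd with ⟨hh, hm⟩
  cases wl with
  | nil => simp at hh
  | cons w rest =>
    have hw : w = "-" := by simpa using hh
    subst hw
    unfold joinSeparatedHyphens joinSeparatedHyphens_alt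
    rw [jsh_times_eq, jshLoopA_front]
    intro he
    have hlt := jshB_len_lt ["-"] rest (by simp) (by simpa using hm)
    rw [show jshB [] ("-" :: rest) = jshB ["-"] rest from by simp [jshB]] at he
    have hlen := congrArg List.length he
    simp at hlen hlt
    omega
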